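-- pv_equiv track=rewrite | github.com/EdersonCR/CVRP | src/Calculo/calculo.py | verificaReducaoRotas
-- ===== SOURCE A (Python) =====
-- def verificaReducaoRotas(rota):
--
--   reduz = True
--   while reduz == True:
--     reduz = False
--     for i in range(0, len(rota)-1):
--       if rota[i] == 0 and rota[i+1] == 0:
--         del rota[i]
--         reduz = True
--         break
--
--   return rota
--
--
--   ''' Função que converte um lista com as rotas em um dicionario de rotas
--     Entrada: rota = [ nós ] listas com a ordem de visitação de nós nas rotas
--     Saida: dicionario = {id_rota: [ clientes ]} dicionário com as listas de clientes de cada rota '''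
-- ===== SOURCE B (Python) =====
-- from itertools import groupby
--
-- def verificaReducaoRotas(rota):
--   out = []
--   for key, group in groupby(rota):
--     if key == 0:
--       out.append(0)
--     else:
--       out.extend(group)
--   rota[:] = out
--   return rota
-- ===== Notes on version B (the rewrite author's own statement) =====
-- stated objective: idiomatic
-- what changed: Replaces the restart-the-whole-scan while loop with repeated single deletions by one itertools.groupby pass over runs of equal values, collapsing each zero run to a single 0 and writing the result back in place.
import Mathlib
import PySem

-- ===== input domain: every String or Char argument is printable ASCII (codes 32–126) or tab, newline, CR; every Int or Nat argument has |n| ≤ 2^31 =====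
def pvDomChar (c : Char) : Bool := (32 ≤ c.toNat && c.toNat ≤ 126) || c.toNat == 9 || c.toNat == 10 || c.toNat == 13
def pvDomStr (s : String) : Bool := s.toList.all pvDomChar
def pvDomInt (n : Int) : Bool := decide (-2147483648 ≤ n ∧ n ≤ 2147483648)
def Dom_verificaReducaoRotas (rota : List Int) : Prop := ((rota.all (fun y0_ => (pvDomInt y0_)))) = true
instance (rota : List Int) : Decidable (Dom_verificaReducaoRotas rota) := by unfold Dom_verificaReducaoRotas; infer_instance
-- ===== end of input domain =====

-- B collapses each run of consecutive zeros in ONE groupby pass instead of A's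
-- restart-the-scan while loop that deletes one element at a time (idiomatic).
-- Both Pythons mutate the argument list in place and return it; the equivalence
-- proved here is about the returned value (= final list contents, identical in both).

-- ===== PORT A =====
-- A's inner for loop: scan for the first index i with rota[i] == 0 and rota[i+1] == 0
-- (structural recursion over the list, returning the index of the first adjacent zero pair).
def pvScanPair : List Int → Option Nat
  | x :: y :: xs => if x = 0 ∧ y = 0 then some 0 else (pvScanPair (y :: xs)).map (· + 1)
  | _ => none

theorem pvScanPair_some_lt (l : List Int) (i : Nat) (h : pvScanPair l = some i) :
    i + 1 < l.length := by
  induction l generalizing i with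
  | nil => simp [pvScanPair] at h
  | cons x xs ih =>
    cases xs with
    | nil => simp [pvScanPair] at h
    | cons y ys =>
      by_cases hp : x = 0 ∧ y = 0
      · simp [pvScanPair, hp] at h
        simp only [List.length_cons]
        omega
      · simp [pvScanPair, hp] at h
        obtain ⟨j, hj, rfl⟩ := h
        have := ih j hj
        simpa using Nat.succ_lt_succ this

-- A's outer while loop: while some adjacent zero pair exists, delete the first one.
def verificaReducaoRotas (rota : List Int) : List Int :=
  match h : pvScanPair rota with
  | some i => verificaReducaoRotas (rota.eraseIdx i)
  | none => rota
termination_by rota.length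
decreasing_by
  have := pvScanPair_some_lt rota i h
  have : i < rota.length := by omega
  simp [List.length_eraseIdx, this]
  omega

-- ===== PORT B =====
-- Source B's groupby loop: each run of equal consecutive values becomes a single 0
-- (if its value is 0) or is kept whole; recursion over the run decomposition.
def verificaReducaoRotas_alt : List Int → List Int
  | [] => []
  | x :: xs =>
    (if x = 0 then [0] else x :: xs.takeWhile (· = x)) ++
      verificaReducaoRotas_alt (xs.dropWhile (· = x))
termination_by l => l.length
decreasing_by
  have := List.length_dropWhile_le (· = x) xs
  simp; omega

-- ===== PRECONDITION & SPEC =====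
def Spec_verificaReducaoRotas (rota : List Int) (out : List Int) : Prop := out = verificaReducaoRotas_alt rota
instance (rota : List Int) (out : List Int) : Decidable (Spec_verificaReducaoRotas rota out) := by unfold Spec_verificaReducaoRotas; infer_instance

-- ===== CLAIM (what is proved, stated in full; the proofs are below) =====
def Claim_equal_verificaReducaoRotas : Prop := ∀ (rota : List Int), Dom_verificaReducaoRotas rota → Spec_verificaReducaoRotas rota (verificaReducaoRotas rota)

-- ===== LEMMAS AND PROOFS =====

-- canonical one-pass collapse of adjacent zero pairs; both ports are proved equal to it
def pvCollapse : List Int → List Int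
  | [] => []
  | [x] => [x]
  | x :: y :: xs => if x = 0 ∧ y = 0 then pvCollapse (y :: xs) else x :: pvCollapse (y :: xs)

theorem pvCollapse_of_scan_none (l : List Int) (h : pvScanPair l = none) :
    pvCollapse l = l := by
  induction l with
  | nil => rfl
  | cons x xs ih =>
    cases xs with
    | nil => rfl
    | cons y ys =>
      by_cases hp : x = 0 ∧ y = 0
      · simp [pvScanPair, hp] at h
      · simp [pvScanPair, hp] at h
        simp [pvCollapse, hp, ih h]

theorem pvCollapse_erase (l : List Int) (i : Nat) (h : pvScanPair l = some i) :
    pvCollapse (l.eraseIdx i) = pvCollapse l := by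
  induction l generalizing i with
  | nil => simp [pvScanPair] at h
  | cons x xs ih =>
    cases xs with
    | nil => simp [pvScanPair] at h
    | cons y ys =>
      by_cases hp : x = 0 ∧ y = 0
      · simp [pvScanPair, hp] at h
        subst h
        obtain ⟨rfl, rfl⟩ := hp
        simp [List.eraseIdx, pvCollapse]
      · simp [pvScanPair, hp] at h
        obtain ⟨j, hj, rfl⟩ := h
        have ihj := ih j hj
        -- eraseIdx (x :: y :: ys) (j+1) = x :: eraseIdx (y :: ys) j
        show pvCollapse (x :: (y :: ys).eraseIdx j) = pvCollapse (x :: y :: ys)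
        cases j with
        | zero =>
          -- pair at head of y :: ys : y = 0 and ys = 0 :: _
          cases ys with
          | nil => simp [pvScanPair] at hj
          | cons z zs =>
            by_cases hyz : y = 0 ∧ z = 0
            · obtain ⟨rfl, rfl⟩ := hyz
              have hx : ¬ (x = 0 ∧ (0:Int) = 0) := by simpa using hp
              simp [List.eraseIdx, pvCollapse]
            · simp [pvScanPair, hyz] at hj
        | succ j' =>
          -- head y survives the erase
          cases ys with
          | nil =>
            exfalso
            have := pvScanPair_some_lt (y :: ([] : List Int)) (j' + 1) hj
            simp at this
          | cons z zs =>
            have : (y :: z :: zs).eraseIdx (j' + 1) = y :: (z :: zs).eraseIdx j' := rfl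
            rw [this]
            simp only [pvCollapse, hp]
            congr 1
            simpa [this] using ihj

theorem verificaReducaoRotas_eq_collapse (l : List Int) :
    verificaReducaoRotas l = pvCollapse l := by
  induction hn : l.length using Nat.strong_induction_on generalizing l with
  | _ n ih =>
    subst hn
    rw [verificaReducaoRotas]
    split
    · rename_i i h
      have hlt := pvScanPair_some_lt l i h
      have hi : i < l.length := by omega
      have hlen : (l.eraseIdx i).length < l.length := by
        simp [List.length_eraseIdx, hi]; omega
      rw [ih _ hlen _ rfl, pvCollapse_erase l i h]
    · rename_i h
      exact (pvCollapse_of_scan_none l h).symm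

theorem pvCollapse_zero_run (xs : List Int) :
    pvCollapse (0 :: xs) = 0 :: pvCollapse (xs.dropWhile (· = (0:Int))) := by
  induction xs with
  | nil => rfl
  | cons y ys ih =>
    by_cases hy : y = 0
    · subst hy
      have h1 : pvCollapse (0 :: 0 :: ys) = pvCollapse (0 :: ys) := by simp [pvCollapse]
      rw [h1, ih]
      simp [List.dropWhile]
    · have : ¬ ((0:Int) = 0 ∧ y = 0) := by simp [hy]
      simp [pvCollapse, List.dropWhile, hy]

theorem pvCollapse_nonzero_run (xs : List Int) : ∀ x : Int, x ≠ 0 →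
    pvCollapse (x :: xs) =
      (x :: xs.takeWhile (· = x)) ++ pvCollapse (xs.dropWhile (· = x)) := by
  induction xs with
  | nil => intro x hx; simp [pvCollapse]
  | cons y ys ih =>
    intro x hx
    have hp : ¬ (x = 0 ∧ y = 0) := by simp [hx]
    by_cases hy : y = x
    · subst hy
      simp only [pvCollapse, if_neg hp]
      rw [ih _ hx]
      simp [List.takeWhile, List.dropWhile]
    · simp [pvCollapse, hp, List.takeWhile, List.dropWhile, hy]

theorem alt_eq_collapse (l : List Int) :
    verificaReducaoRotas_alt l = pvCollapse l := by
  induction hn : l.length using Nat.strong_induction_on generalizing l with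
  | _ n ih =>
    subst hn
    cases l with
    | nil => simp [verificaReducaoRotas_alt, pvCollapse]
    | cons x xs =>
      rw [verificaReducaoRotas_alt]
      have hlen : (xs.dropWhile (· = x)).length < (x :: xs).length := by
        have := List.length_dropWhile_le (· = x) xs
        simp; omega
      rw [ih _ hlen _ rfl]
      by_cases hx : x = 0
      · subst hx; simp [pvCollapse_zero_run]
      · simp [pvCollapse_nonzero_run xs x hx, hx]

-- ===== VERDICT (by name: the statement is the Claim_ definition above) =====
theorem verificaReducaoRotas_spec : Claim_equal_verificaReducaoRotas := by
  intro rota _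
  unfold Spec_verificaReducaoRotas
  rw [verificaReducaoRotas_eq_collapse, alt_eq_collapse]
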